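-- pv_equiv track=rewrite | github.com/Vergil0327/leetcode-history | Math&Geometry/3671. Sum of Beautiful Subsequences/solution.py | totalBeauty
-- ===== SOURCE A (Python) =====
-- from typing import List
--
-- class FenwickTree:
--     def __init__(self, n, mod):
--         self.MOD = mod
--         self.n = n
--         self.tree = [0] * (n + 1)
--
--     def update(self, i, delta):
--         while i <= self.n:
--             self.tree[i] = (self.tree[i] + delta) % self.MOD
--             i += i & (-i)
--
--     def query(self, i):
--         res = 0
--         while i > 0:
--             res = (res + self.tree[i]) % self.MOD
--             i -= i & (-i)
--         return res
--
-- def totalBeauty(nums: List[int]) -> int: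
--     MOD = 10**9 + 7
--     max_val = max(nums)
--
--     # Count strictly increasing subsequences
--     def count_increasing_subsequences(arr):
--         if not arr: return 0
--
--         # Coordinate compression
--         sorted_vals = sorted(set(arr))
--         rank = {val: i + 1 for i, val in enumerate(sorted_vals)}
--
--         ft = FenwickTree(len(sorted_vals), MOD)
--         total = 0
--
--         for num in arr:
--             r = rank[num]
--             # Ways to extend existing subsequences + this element as singleton
--             ways = (ft.query(r - 1) + 1) % MOD
--             ft.update(r, ways)
--             total = (total + ways) % MOD
--
--         return total
--
--     # Step 1: For each g, count subsequences with GCD being a multiple of g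
--     cnt = {}
--     for g in range(1, max_val + 1):
--         # Filter elements divisible by g and scale down
--         filtered = []
--         for num in nums:
--             if num % g == 0:
--                 filtered.append(num // g)
--
--         cnt[g] = count_increasing_subsequences(filtered)
--
--     # Step 2: Use inclusion-exclusion to get exactly g
--     F = {}
--     for g in range(max_val, 0, -1):  # Process from max down to 1
--         F[g] = cnt[g]
--         # Subtract overcounted multiples
--         for k in range(2 * g, max_val + 1, g):
--             F[g] = (F[g] - F[k]) % MOD
--
--     # Step 3: Calculate final answer
--     result = 0
--     for g in range(1, max_val + 1):
--         result = (result + g * F[g]) % MOD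
--
--     return result
-- ===== SOURCE B (Python) =====
-- from typing import List
--
-- # B: instead of scanning the whole array once per candidate gcd g (O(max_val * n)),
-- # bucket each element into the buckets of its divisors (enumerated in O(sqrt|v|)),
-- # then run one fused descending inclusion-exclusion pass that accumulates the answer.
--
-- class FenwickTree:
--     def __init__(self, n, mod):
--         self.MOD = mod
--         self.n = n
--         self.tree = [0] * (n + 1)
--
--     def update(self, i, delta):
--         while i <= self.n:
--             self.tree[i] = (self.tree[i] + delta) % self.MOD
--             i += i & (-i)
--
--     def query(self, i):
--         res = 0
--         while i > 0:
--             res = (res + self.tree[i]) % self.MOD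
--             i -= i & (-i)
--         return res
--
-- def count_increasing_subsequences(arr, MOD):
--     if not arr:
--         return 0
--     sorted_vals = sorted(set(arr))
--     rank = {val: i + 1 for i, val in enumerate(sorted_vals)}
--     ft = FenwickTree(len(sorted_vals), MOD)
--     total = 0
--     for num in arr:
--         r = rank[num]
--         ways = (ft.query(r - 1) + 1) % MOD
--         ft.update(r, ways)
--         total = (total + ways) % MOD
--     return total
--
-- def totalBeauty(nums: List[int]) -> int:
--     MOD = 10**9 + 7
--     max_val = max(nums)
--
--     # One pass over nums: drop each element into the bucket of every divisor.
--     buckets = {}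
--     for num in nums:
--         a = -num if num < 0 else num
--         if a == 0:
--             gs = range(1, max_val + 1)   # 0 is divisible by every g
--         else:
--             gs = []
--             d = 1
--             while d * d <= a:
--                 if a % d == 0:
--                     gs.append(d)
--                     if d != a // d:
--                         gs.append(a // d)
--                 d += 1
--         for g in gs:
--             buckets.setdefault(g, []).append(num // g)
--
--     # Fused inclusion-exclusion + answer accumulation, descending over g.
--     F = [0] * (max_val + 1)
--     result = 0
--     for g in range(max_val, 0, -1):
--         fg = count_increasing_subsequences(buckets.get(g, []), MOD)
--         for k in range(2 * g, max_val + 1, g):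
--             fg = (fg - F[k]) % MOD
--         F[g] = fg
--         result = (result + g * fg) % MOD
--     return result
-- ===== Notes on version B (the rewrite author's own statement) =====
-- stated objective: faster
-- what changed: Instead of scanning the whole array once for every candidate gcd g (O(max_val*n) filtering work), B makes one pass over nums dropping each element into the buckets of all its divisors (enumerated in O(sqrt|v|)), and fuses the inclusion-exclusion pass with the answer accumulation into a single descending loop.
import Mathlib
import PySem

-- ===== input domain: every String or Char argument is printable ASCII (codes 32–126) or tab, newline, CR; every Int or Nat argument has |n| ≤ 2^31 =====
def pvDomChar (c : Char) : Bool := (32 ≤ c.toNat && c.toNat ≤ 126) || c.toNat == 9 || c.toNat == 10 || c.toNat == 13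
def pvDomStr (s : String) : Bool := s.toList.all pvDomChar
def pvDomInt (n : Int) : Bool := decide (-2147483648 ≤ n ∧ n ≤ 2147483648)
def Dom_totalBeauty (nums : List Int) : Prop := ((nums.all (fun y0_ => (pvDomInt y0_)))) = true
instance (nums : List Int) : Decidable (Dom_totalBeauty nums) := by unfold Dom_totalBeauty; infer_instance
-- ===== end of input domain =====

-- B buckets each element under all of its divisors in one pass (O(sqrt|v|) enumeration) and fuses the
-- inclusion-exclusion pass with the answer accumulation; A scans the whole array once per candidate gcd.

-- ===== SHARED HELPER (the subsequence counter; identical subroutine in Source A and Source B) =====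

-- lowbit i = i & (-i), Python-exact bitwise AND
def pvLowbit (i : Int) : Int := PySem.Int.band i (-i)

-- 'while i <= n: tree[i] += delta; i += i & -i' — fuel-bounded transcription of the while loop
-- (fuel n+1 is enough in every real run: for i ≥ 1 the lowbit is ≥ 1, so i strictly increases).
def pvFtUpdate (n MOD : Int) (tree : List Int) (i delta : Int) : Nat → List Int
  | 0 => tree
  | fuel + 1 =>
    if i ≤ n then
      pvFtUpdate n MOD (PySem.List.pySetD tree i (PySem.Int.mod (PySem.List.pyGetD tree i 0 + delta) MOD))
        (i + pvLowbit i) delta fuel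
    else tree

-- 'while i > 0: res += tree[i]; i -= i & -i'
def pvFtQuery (MOD : Int) (tree : List Int) (res i : Int) : Nat → Int
  | 0 => res
  | fuel + 1 =>
    if i > 0 then
      pvFtQuery MOD tree (PySem.Int.mod (res + PySem.List.pyGetD tree i 0) MOD) (i - pvLowbit i) fuel
    else res

-- count_increasing_subsequences(arr) with the Fenwick tree, as written in both sources
def pvCountInc (MOD : Int) (arr : List Int) : Int :=
  if arr = [] then 0
  else
    let sortedVals := PySem.List.sorted (PySem.Set.ofList arr) (fun x => x) false
    -- rank = {val: i + 1 for i, val in enumerate(sorted_vals)}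
    let rank : PySem.Dict Int Int :=
      (PySem.List.enumerate sortedVals 0).foldl (fun d p => d.insert p.2 (p.1 + 1)) PySem.Dict.empty
    let n : Int := PySem.List.len sortedVals
    let st := arr.foldl (fun (st : List Int × Int) num =>
        let r := rank.getD num 0      -- key always present: num ∈ arr ⊆ sorted_vals
        let ways := PySem.Int.mod (pvFtQuery MOD st.1 0 (r - 1) (n.toNat + 1) + 1) MOD
        let tree := pvFtUpdate n MOD st.1 r ways (n.toNat + 1)
        (tree, PySem.Int.mod (st.2 + ways) MOD))
      (List.replicate (n.toNat + 1) 0, 0)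
    st.2

-- ===== PORT A =====
def totalBeauty (nums : List Int) : Int :=
  match PySem.List.max? nums (fun x => x) with
  | none => 0    -- unreachable under Pre_ (max([]) raises ValueError)
  | some maxVal =>
    let MOD : Int := 1000000007
    -- Step 1: cnt[g] = count of increasing subsequences of the elements divisible by g, scaled down.
    -- cnt (and F below) are dicts in the source, keyed by exactly g = 1..max_val and written before
    -- every read; they are ported as value tables indexed by g (the 0-default is never read).
    let cnt : Array Int :=
      (PySem.List.pyRange 1 (maxVal + 1) 1).foldl (fun cnt g =>
        let filtered := nums.foldl (fun acc num =>
          if PySem.Int.mod num g = 0 then acc ++ [PySem.Int.floordiv num g] else acc) []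
        cnt.setIfInBounds g.toNat (pvCountInc MOD filtered)) (Array.replicate (maxVal + 1).toNat 0)
    -- Step 2: inclusion-exclusion, descending, with the repeated F[g] writes of the source
    let F : Array Int :=
      (PySem.List.pyRange maxVal 0 (-1)).foldl (fun F g =>
        let F := F.setIfInBounds g.toNat (cnt.getD g.toNat 0)
        (PySem.List.pyRange (2 * g) (maxVal + 1) g).foldl (fun F k =>
          F.setIfInBounds g.toNat
            (PySem.Int.mod (F.getD g.toNat 0 - F.getD k.toNat 0) MOD)) F)
        (Array.replicate (maxVal + 1).toNat 0)
    -- Step 3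
    (PySem.List.pyRange 1 (maxVal + 1) 1).foldl (fun result g =>
      PySem.Int.mod (result + g * F.getD g.toNat 0) MOD) 0

-- ===== PORT B =====

-- divisor enumeration: 'd = 1; while d*d <= a: if a % d == 0: gs.append(d); if d != a//d: gs.append(a//d); d += 1'
def pvDivs (a d : Int) (gs : List Int) : List Int :=
  if h : d * d ≤ a then
    pvDivs a (d + 1)
      (gs ++ (if PySem.Int.mod a d = 0 then
          if d ≠ PySem.Int.floordiv a d then [d, PySem.Int.floordiv a d] else [d]
        else []))
  else gs
  termination_by (a + 1 - d).toNat
  decreasing_by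
    have hd : d ≤ a := by nlinarith [mul_self_nonneg d]
    omega

def totalBeauty_alt (nums : List Int) : Int :=
  match PySem.List.max? nums (fun x => x) with
  | none => 0    -- unreachable under Pre_ (max([]) raises ValueError)
  | some maxVal =>
    let MOD : Int := 1000000007
    -- one pass: drop each num into the bucket of every divisor
    let buckets : PySem.Dict Int (List Int) :=
      nums.foldl (fun bk num =>
        let a := if num < 0 then -num else num
        let gs := if a = 0 then PySem.List.pyRange 1 (maxVal + 1) 1 else pvDivs a 1 []
        gs.foldl (fun bk g => bk.modify g [] (fun l => l ++ [PySem.Int.floordiv num g])) bk)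
        PySem.Dict.empty
    -- fused descending inclusion-exclusion + answer accumulation (F is a list in Source B)
    let st := (PySem.List.pyRange maxVal 0 (-1)).foldl (fun (st : Array Int × Int) g =>
        let fg0 := pvCountInc MOD (buckets.getD g [])
        let fg := (PySem.List.pyRange (2 * g) (maxVal + 1) g).foldl (fun f k =>
          PySem.Int.mod (f - st.1.getD k.toNat 0) MOD) fg0
        (st.1.setIfInBounds g.toNat fg, PySem.Int.mod (st.2 + g * fg) MOD))
        (Array.replicate (maxVal + 1).toNat 0, 0)
    st.2

-- ===== PRECONDITION & SPEC =====
-- Pre_ excludes only the empty list, on which A raises ValueError (max of empty sequence).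
def Pre_totalBeauty (nums : List Int) : Prop := nums ≠ []
instance (nums : List Int) : Decidable (Pre_totalBeauty nums) := by unfold Pre_totalBeauty; infer_instance
def pvWitness_totalBeauty : List Int := [2, 1, 4]

def Spec_totalBeauty (nums : List Int) (out : Int) : Prop := out = totalBeauty_alt nums
instance (nums : List Int) (out : Int) : Decidable (Spec_totalBeauty nums out) := by unfold Spec_totalBeauty; infer_instance

-- ===== CLAIM (what is proved, stated in full; the proofs are below) =====
def Claim_equal_totalBeauty : Prop := ∀ (nums : List Int), Dom_totalBeauty nums → Pre_totalBeauty nums → Spec_totalBeauty nums (totalBeauty nums)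

-- ===== LEMMAS AND PROOFS =====

-- ---- generic list/fold facts ----

-- first component of a paired fold whose first component ignores the second
lemma pvFst_foldl_pair {α β γ : Type} (l : List γ) (f : α → γ → α) (h : α × β → γ → β) (s : α × β) :
    (l.foldl (fun st x => (f st.1 x, h st x)) s).1 = l.foldl f s.1 := by
  induction l generalizing s with
  | nil => rfl
  | cons x xs ih => exact ih _

-- a '(res + t) % MOD' accumulation is the sum mod MOD
lemma pvFoldl_modadd {α : Type} (MOD : Int) (hM : 0 < MOD) (t : α → Int) (l : List α) (r0 : Int)
    (h0 : 0 ≤ r0) (h1 : r0 < MOD) :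
    l.foldl (fun r x => PySem.Int.mod (r + t x) MOD) r0 = PySem.Int.mod (r0 + (l.map t).sum) MOD := by
  induction l generalizing r0 with
  | nil =>
    simp [PySem.Int.mod_eq_emod_of_pos hM, Int.emod_eq_of_lt h0 h1]
  | cons x xs ih =>
    have hb0 := PySem.Int.mod_nonneg (r0 + t x) hM
    have hb1 := PySem.Int.mod_lt (r0 + t x) hM
    rw [List.foldl_cons, ih _ hb0 hb1]
    simp only [PySem.Int.mod_eq_emod_of_pos hM, Int.emod_add_emod, List.map_cons, List.sum_cons]
    ring_nf

-- ---- the divisor enumeration is exact ----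

lemma pvCount_pvDivs (a d g : Int) (gs : List Int) (ha : 1 ≤ a) (hd : 1 ≤ d) :
    (pvDivs a d gs).count g = gs.count g
    + (if 1 ≤ g ∧ g ∣ a ∧ d ≤ g ∧ g * g ≤ a then 1 else 0)
    + (if 1 ≤ g ∧ g ∣ a ∧ d ≤ a / g ∧ (a / g) * (a / g) ≤ a ∧ g ≠ a / g then 1 else 0) := by
  by_cases h : d * d ≤ a
  · rw [pvDivs, dif_pos h, pvCount_pvDivs a (d + 1) g _ ha (by omega), List.count_append]
    by_cases hdvd : d ∣ a
    · have hm0 : PySem.Int.mod a d = 0 := (PySem.Int.mod_eq_zero_iff_dvd a d).2 hdvd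
      have hfd : PySem.Int.floordiv a d = a / d := PySem.Int.floordiv_eq_ediv_of_pos (by omega)
      rw [if_pos hm0, hfd]
      have hqd : a / d * d = a := Int.ediv_mul_cancel hdvd
      have hq1 : 1 ≤ a / d := by nlinarith
      have hdq : d ≤ a / d := by nlinarith
      by_cases hg : g = d
      · subst hg
        have c1d : (if 1 ≤ g ∧ g ∣ a ∧ g ≤ g ∧ g * g ≤ a then (1:Nat) else 0) = 1 :=
          if_pos ⟨by omega, hdvd, le_refl g, h⟩
        have c1d1 : (if 1 ≤ g ∧ g ∣ a ∧ g + 1 ≤ g ∧ g * g ≤ a then (1:Nat) else 0) = 0 :=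
          if_neg (by rintro ⟨_, _, hh, _⟩; omega)
        rw [c1d, c1d1]
        by_cases hq_eq : g = a / g
        · have hne2 : ¬ (g ≠ a / g) := fun hh => hh hq_eq
          rw [if_neg hne2]
          have c2a : (if 1 ≤ g ∧ g ∣ a ∧ g + 1 ≤ a / g ∧ (a / g) * (a / g) ≤ a ∧ g ≠ a / g
              then (1:Nat) else 0) = 0 := if_neg (by rintro ⟨_, _, _, _, hne⟩; exact hne hq_eq)
          have c2b : (if 1 ≤ g ∧ g ∣ a ∧ g ≤ a / g ∧ (a / g) * (a / g) ≤ a ∧ g ≠ a / g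
              then (1:Nat) else 0) = 0 := if_neg (by rintro ⟨_, _, _, _, hne⟩; exact hne hq_eq)
          rw [c2a, c2b]
          simp
        · rw [if_pos hq_eq]
          have e2 : (1 ≤ g ∧ g ∣ a ∧ g + 1 ≤ a / g ∧ (a / g) * (a / g) ≤ a ∧ g ≠ a / g)
              ↔ (1 ≤ g ∧ g ∣ a ∧ g ≤ a / g ∧ (a / g) * (a / g) ≤ a ∧ g ≠ a / g) := by
            constructor
            · rintro ⟨h1, h2, h3, h4, h5⟩
              exact ⟨h1, h2, by omega, h4, h5⟩
            · rintro ⟨h1, h2, h3, h4, h5⟩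
              refine ⟨h1, h2, ?_, h4, h5⟩
              rcases lt_or_eq_of_le h3 with hlt | heq
              · omega
              · exact absurd heq hq_eq
          rw [if_congr e2 rfl rfl]
          have cb : List.count g [g, a / g] = 1 := by
            have hne' : ¬ (a / g) = g := fun hh => hq_eq hh.symm
            simp [hne']
          rw [cb]
      · by_cases hgq : g = a / d
        · have hqdvd : g ∣ a := ⟨d, by rw [hgq]; linarith⟩
          have haq : a / g = d := by
            have hb : a / d ≠ 0 := by omega
            have h2 := Int.mul_ediv_cancel_left (a := a / d) d hb
            rw [hqd] at h2
            rw [hgq]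
            exact h2
          have hne : d ≠ a / d := fun hh => hg (hgq.trans hh.symm)
          rw [if_pos hne]
          have cb : List.count g [d, a / d] = 1 := by
            rw [← hgq]
            have hne' : ¬ d = g := fun hh => hg hh.symm
            simp [hne']
          have c2d : (if 1 ≤ g ∧ g ∣ a ∧ d ≤ a / g ∧ (a / g) * (a / g) ≤ a ∧ g ≠ a / g
              then (1:Nat) else 0) = 1 :=
            if_pos ⟨by omega, hqdvd, by rw [haq], by rw [haq]; exact h, by rw [haq]; exact hg⟩
          have c2d1 : (if 1 ≤ g ∧ g ∣ a ∧ d + 1 ≤ a / g ∧ (a / g) * (a / g) ≤ a ∧ g ≠ a / g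
              then (1:Nat) else 0) = 0 :=
            if_neg (by rw [haq]; rintro ⟨_, _, hh, _, _⟩; omega)
          have e1 : (1 ≤ g ∧ g ∣ a ∧ d + 1 ≤ g ∧ g * g ≤ a)
              ↔ (1 ≤ g ∧ g ∣ a ∧ d ≤ g ∧ g * g ≤ a) := by
            constructor
            · rintro ⟨h1, h2, h3, h4⟩
              exact ⟨h1, h2, by omega, h4⟩
            · rintro ⟨h1, h2, h3, h4⟩
              refine ⟨h1, h2, ?_, h4⟩
              rcases lt_or_eq_of_le h3 with hlt | heq
              · omega
              · exact absurd heq.symm hg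
          rw [if_congr e1 rfl rfl, cb, c2d, c2d1]
          omega
        · have hrne : g ∣ a → a / g ≠ d := by
            intro hga hr
            have hgg : a / g * g = a := Int.ediv_mul_cancel hga
            rw [hr] at hgg
            apply hgq
            have hcan : d * g = d * (a / d) := by nlinarith
            have := mul_left_cancel₀ (show (d:Int) ≠ 0 by omega) hcan
            omega
          have cb : List.count g (if d ≠ a / d then [d, a / d] else [d]) = 0 := by
            have hne1 : ¬ d = g := fun hh => hg hh.symm
            have hne2 : ¬ (a / d) = g := fun hh => hgq hh.symm
            split <;> simp [hne1, hne2]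
          have e1 : (1 ≤ g ∧ g ∣ a ∧ d + 1 ≤ g ∧ g * g ≤ a)
              ↔ (1 ≤ g ∧ g ∣ a ∧ d ≤ g ∧ g * g ≤ a) := by
            constructor
            · rintro ⟨h1, h2, h3, h4⟩
              exact ⟨h1, h2, by omega, h4⟩
            · rintro ⟨h1, h2, h3, h4⟩
              refine ⟨h1, h2, ?_, h4⟩
              rcases lt_or_eq_of_le h3 with hlt | heq
              · omega
              · exact absurd heq.symm hg
          have e2 : (1 ≤ g ∧ g ∣ a ∧ d + 1 ≤ a / g ∧ (a / g) * (a / g) ≤ a ∧ g ≠ a / g)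
              ↔ (1 ≤ g ∧ g ∣ a ∧ d ≤ a / g ∧ (a / g) * (a / g) ≤ a ∧ g ≠ a / g) := by
            constructor
            · rintro ⟨h1, h2, h3, h4, h5⟩
              exact ⟨h1, h2, by omega, h4, h5⟩
            · rintro ⟨h1, h2, h3, h4, h5⟩
              refine ⟨h1, h2, ?_, h4, h5⟩
              have := hrne h2
              omega
          rw [if_congr e1 rfl rfl, if_congr e2 rfl rfl, cb]
          omega
    · have hm0 : ¬ PySem.Int.mod a d = 0 := fun hh =>
        hdvd ((PySem.Int.mod_eq_zero_iff_dvd a d).1 hh)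
      rw [if_neg hm0]
      have e1 : (1 ≤ g ∧ g ∣ a ∧ d + 1 ≤ g ∧ g * g ≤ a)
          ↔ (1 ≤ g ∧ g ∣ a ∧ d ≤ g ∧ g * g ≤ a) := by
        constructor
        · rintro ⟨h1, h2, h3, h4⟩
          exact ⟨h1, h2, by omega, h4⟩
        · rintro ⟨h1, h2, h3, h4⟩
          refine ⟨h1, h2, ?_, h4⟩
          rcases lt_or_eq_of_le h3 with hlt | heq
          · omega
          · exact absurd (heq ▸ h2) hdvd
      have e2 : (1 ≤ g ∧ g ∣ a ∧ d + 1 ≤ a / g ∧ (a / g) * (a / g) ≤ a ∧ g ≠ a / g)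
          ↔ (1 ≤ g ∧ g ∣ a ∧ d ≤ a / g ∧ (a / g) * (a / g) ≤ a ∧ g ≠ a / g) := by
        constructor
        · rintro ⟨h1, h2, h3, h4, h5⟩
          exact ⟨h1, h2, by omega, h4, h5⟩
        · rintro ⟨h1, h2, h3, h4, h5⟩
          refine ⟨h1, h2, ?_, h4, h5⟩
          have hr : a / g ≠ d := by
            intro hr
            have hgg : a / g * g = a := Int.ediv_mul_cancel h2
            rw [hr] at hgg
            exact hdvd ⟨g, hgg.symm⟩
          omega
      rw [if_congr e1 rfl rfl, if_congr e2 rfl rfl]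
      simp
  · rw [pvDivs, dif_neg h]
    have c1 : ¬ (1 ≤ g ∧ g ∣ a ∧ d ≤ g ∧ g * g ≤ a) := by
      rintro ⟨h1, _, h3, h4⟩
      nlinarith
    have c2 : ¬ (1 ≤ g ∧ g ∣ a ∧ d ≤ a / g ∧ (a / g) * (a / g) ≤ a ∧ g ≠ a / g) := by
      rintro ⟨h1, _, h3, h4, _⟩
      nlinarith
    rw [if_neg c1, if_neg c2]
    simp
  termination_by (a + 1 - d).toNat
  decreasing_by
    have hda : d ≤ a := by nlinarith [mul_self_nonneg d]
    omega

lemma pvCount_pvDivs_one (a g : Int) (ha : 1 ≤ a) :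
    (pvDivs a 1 []).count g = if 1 ≤ g ∧ g ∣ a then 1 else 0 := by
  rw [pvCount_pvDivs a 1 g [] ha le_rfl, List.count_nil]
  by_cases hgd : 1 ≤ g ∧ g ∣ a
  · obtain ⟨hg, hdvd⟩ := hgd
    have hga : g ≤ a := Int.le_of_dvd (by omega) hdvd
    have hq : a / g * g = a := Int.ediv_mul_cancel hdvd
    have hq1 : 1 ≤ a / g := by nlinarith
    by_cases hsq : g * g ≤ a
    · have c2 : ¬ (1 ≤ g ∧ g ∣ a ∧ 1 ≤ a / g ∧ (a / g) * (a / g) ≤ a ∧ g ≠ a / g) := by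
        rintro ⟨_, _, _, h4, h5⟩
        apply h5
        nlinarith
      rw [if_pos ⟨hg, hdvd, hg, hsq⟩, if_neg c2, if_pos ⟨hg, hdvd⟩]
    · have hqg : a / g < g := by nlinarith
      have c2 : (1 ≤ g ∧ g ∣ a ∧ 1 ≤ a / g ∧ (a / g) * (a / g) ≤ a ∧ g ≠ a / g) := by
        refine ⟨hg, hdvd, hq1, by nlinarith, by omega⟩
      rw [if_neg (by rintro ⟨_, _, _, h4⟩; exact hsq h4), if_pos c2, if_pos ⟨hg, hdvd⟩]
  · rw [if_neg (by rintro ⟨h1, h2, _, _⟩; exact hgd ⟨h1, h2⟩),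
        if_neg (by rintro ⟨h1, h2, _, _, _⟩; exact hgd ⟨h1, h2⟩), if_neg hgd]

lemma pvCount_pyRange (m g : Int) :
    (PySem.List.pyRange 1 (m + 1) 1).count g = if 1 ≤ g ∧ g ≤ m then 1 else 0 := by
  split
  · exact List.count_eq_one_of_mem (PySem.List.nodup_pyRange_one _ _)
      (PySem.List.mem_pyRange_one.2 (by omega))
  · refine List.count_eq_zero.2 (fun hmem => ?_)
    have := PySem.List.mem_pyRange_one.1 hmem
    omega

-- per element: how many times g occurs among the enumerated bucket keys of num
lemma pvCount_gs (m num g : Int) (hg1 : 1 ≤ g) (hgm : g ≤ m) :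
    ((if (if num < 0 then -num else num) = 0 then PySem.List.pyRange 1 (m + 1) 1
      else pvDivs (if num < 0 then -num else num) 1 []).count g)
      = if PySem.Int.mod num g = 0 then 1 else 0 := by
  by_cases h0 : (if num < 0 then -num else num) = 0
  · have hnum : num = 0 := by
      by_cases hn : num < 0 <;> simp [hn] at h0 <;> omega
    rw [if_pos h0, pvCount_pyRange, hnum]
    rw [if_pos ⟨hg1, hgm⟩, if_pos ((PySem.Int.mod_eq_zero_iff_dvd 0 g).2 (dvd_zero g))]
  · have ha : 1 ≤ (if num < 0 then -num else num) := by
      by_cases hn : num < 0 <;> simp [hn] <;> omega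
    rw [if_neg h0, pvCount_pvDivs_one _ _ ha]
    have hdiff : g ∣ (if num < 0 then -num else num) ↔ g ∣ num := by
      by_cases hn : num < 0 <;> simp [hn]
    by_cases hdvd : g ∣ num
    · rw [if_pos ⟨hg1, hdiff.2 hdvd⟩, if_pos ((PySem.Int.mod_eq_zero_iff_dvd num g).2 hdvd)]
    · rw [if_neg (fun hh => hdvd (hdiff.1 hh.2)),
          if_neg (fun hh => hdvd ((PySem.Int.mod_eq_zero_iff_dvd num g).1 hh))]

-- ---- the bucket pass reproduces A's per-g filtered list ----

lemma pvBucket_inner (gs : List Int) (num g : Int)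
    (bk : PySem.Dict Int (List Int)) :
    (gs.foldl (fun bk g => bk.modify g [] (fun l => l ++ [PySem.Int.floordiv num g])) bk).getD g []
      = bk.getD g [] ++ List.replicate (gs.count g) (PySem.Int.floordiv num g) := by
  have h1 : gs.foldl (fun bk g => bk.modify g [] (fun l => l ++ [PySem.Int.floordiv num g])) bk
      = (gs.map (fun g => (g, PySem.Int.floordiv num g))).foldl
          (fun d p => d.modify p.1 [] (fun l => l ++ [p.2])) bk := by
    rw [List.foldl_map]
  rw [h1, PySem.Dict.getD_foldl_modify_append, List.filter_map]
  have h2 : (gs.filter ((fun (p : Int × Int) => p.1 == g) ∘ (fun g => (g, PySem.Int.floordiv num g))))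
      = gs.filter (· == g) := by
    apply List.filter_congr; intro x _; rfl
  rw [h2, List.filter_beq]
  simp [List.map_replicate]

lemma pvBucket_eq_filtered (nums : List Int) (m g : Int) (hg1 : 1 ≤ g) (hgm : g ≤ m)
    (bk : PySem.Dict Int (List Int)) :
    ((nums.foldl (fun bk num =>
        (if (if num < 0 then -num else num) = 0 then PySem.List.pyRange 1 (m + 1) 1
         else pvDivs (if num < 0 then -num else num) 1 []).foldl
          (fun bk g => bk.modify g [] (fun l => l ++ [PySem.Int.floordiv num g])) bk) bk).getD g [])
      = bk.getD g [] ++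
        (nums.filter (fun num => decide (PySem.Int.mod num g = 0))).map
          (fun num => PySem.Int.floordiv num g) := by
  induction nums generalizing bk with
  | nil => simp
  | cons num rest ih =>
    rw [List.foldl_cons, ih, pvBucket_inner, pvCount_gs m num g hg1 hgm, List.filter_cons]
    by_cases hc : PySem.Int.mod num g = 0
    · simp [hc, List.append_assoc]
    · simp [hc]

-- ---- array helpers (getD over setIfInBounds; no such combination lemmas exist in the library) ----

lemma pvAGetD_set_self (a : Array Int) (i : Nat) (v : Int) (h : i < a.size) :
    (a.setIfInBounds i v).getD i 0 = v := by
  rw [Array.getD_eq_getD_getElem?, Array.getElem?_setIfInBounds, if_pos rfl, if_pos h]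
  rfl

lemma pvAGetD_set_ne (a : Array Int) (i j : Nat) (v : Int) (hne : j ≠ i) :
    (a.setIfInBounds i v).getD j 0 = a.getD j 0 := by
  rw [Array.getD_eq_getD_getElem?, Array.getD_eq_getD_getElem?, Array.getElem?_setIfInBounds,
    if_neg (fun hh => hne hh.symm)]

-- a write loop over distinct positive keys, read back at one of them
lemma pvFoldSet_getD_notmem (l : List Int) (v : Int → Int) (g : Int) (arr : Array Int)
    (hg1 : 1 ≤ g) (hnm : g ∉ l) (hpos : ∀ x ∈ l, 1 ≤ x) :
    (l.foldl (fun a x => a.setIfInBounds x.toNat (v x)) arr).getD g.toNat 0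
      = arr.getD g.toNat 0 := by
  induction l generalizing arr with
  | nil => rfl
  | cons x l' ih =>
    rw [List.foldl_cons, ih _ (fun hy => hnm (List.mem_cons_of_mem _ hy))
      (fun y hy => hpos y (List.mem_cons_of_mem _ hy))]
    have hx1 : 1 ≤ x := hpos x (List.mem_cons_self ..)
    have hgx : g ≠ x := fun hh => hnm (hh ▸ List.mem_cons_self ..)
    exact pvAGetD_set_ne arr x.toNat g.toNat (v x) (by omega)

lemma pvFoldSet_getD (l : List Int) (v : Int → Int) (g : Int) (arr : Array Int)
    (hnd : l.Nodup) (hpos : ∀ x ∈ l, 1 ≤ x) (hmem : g ∈ l)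
    (hsz : ∀ x ∈ l, x.toNat < arr.size) :
    (l.foldl (fun a x => a.setIfInBounds x.toNat (v x)) arr).getD g.toNat 0 = v g := by
  induction l generalizing arr with
  | nil => exact absurd hmem (List.not_mem_nil)
  | cons x l' ih =>
    rw [List.foldl_cons]
    rcases List.mem_cons.1 hmem with hgx | hgl
    · subst hgx
      rw [pvFoldSet_getD_notmem l' v g _ (hpos g (List.mem_cons_self ..))
        ((List.nodup_cons.1 hnd).1) (fun y hy => hpos y (List.mem_cons_of_mem _ hy))]
      exact pvAGetD_set_self arr g.toNat (v g) (hsz g (List.mem_cons_self ..))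
    · exact ih _ ((List.nodup_cons.1 hnd).2)
        (fun y hy => hpos y (List.mem_cons_of_mem _ hy)) hgl
        (fun y hy => by rw [Array.size_setIfInBounds]; exact hsz y (List.mem_cons_of_mem _ hy))

-- ---- A's cnt table ----

lemma pvCnt_getD (nums : List Int) (m MOD g : Int) (hg1 : 1 ≤ g) (hgm : g ≤ m) :
    (((PySem.List.pyRange 1 (m + 1) 1).foldl (fun cnt g =>
        cnt.setIfInBounds g.toNat (pvCountInc MOD (nums.foldl (fun acc num =>
          if PySem.Int.mod num g = 0 then acc ++ [PySem.Int.floordiv num g] else acc) [])))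
        (Array.replicate (m + 1).toNat 0)).getD g.toNat 0)
      = pvCountInc MOD (nums.foldl (fun acc num =>
          if PySem.Int.mod num g = 0 then acc ++ [PySem.Int.floordiv num g] else acc) []) := by
  refine pvFoldSet_getD _ _ g _ (PySem.List.nodup_pyRange_one _ _) ?_
    (PySem.List.mem_pyRange_one.2 (by omega)) ?_
  · intro x hx
    exact (PySem.List.mem_pyRange_one.1 hx).1
  · intro x hx
    have hb := PySem.List.mem_pyRange_one.1 hx
    rw [Array.size_replicate]
    omega

-- ---- the inclusion-exclusion recurrence, named ----

def pvF (c : Int → Int) (MOD m g : Int) : Int :=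
  if hg : 1 ≤ g then
    ((PySem.List.pyRange (2 * g) (m + 1) g).attach).foldl
      (fun f k => PySem.Int.mod (f - pvF c MOD m k.1) MOD) (c g)
  else 0
  termination_by (m - g).toNat
  decreasing_by
    have hk := (PySem.List.mem_pyRange_iff_of_pos (by omega : (0:Int) < g) k.1).1 k.2
    omega

lemma pvF_eq (c : Int → Int) (MOD m g : Int) (hg : 1 ≤ g) :
    pvF c MOD m g = (PySem.List.pyRange (2 * g) (m + 1) g).foldl
      (fun f k => PySem.Int.mod (f - pvF c MOD m k) MOD) (c g) := by
  rw [pvF, dif_pos hg]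
  exact List.foldl_attach (f := fun f k => PySem.Int.mod (f - pvF c MOD m k) MOD)

-- A's repeated F[g] writes collapse to a local fold
lemma pvInner_collapse (MOD : Int) (ks : List Int) (g x : Int) (F : Array Int)
    (hg : g.toNat < F.size) (hk : ∀ k ∈ ks, k.toNat ≠ g.toNat) :
    ks.foldl (fun F k => F.setIfInBounds g.toNat
        (PySem.Int.mod (F.getD g.toNat 0 - F.getD k.toNat 0) MOD)) (F.setIfInBounds g.toNat x)
      = F.setIfInBounds g.toNat
          (ks.foldl (fun f k => PySem.Int.mod (f - F.getD k.toNat 0) MOD) x) := by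
  induction ks generalizing x with
  | nil => rfl
  | cons k ks ih =>
    have hkg := hk k (List.mem_cons_self ..)
    rw [List.foldl_cons, pvAGetD_set_self F g.toNat x hg,
        pvAGetD_set_ne F g.toNat k.toNat x hkg,
        Array.setIfInBounds_setIfInBounds x,
        ih _ (fun k hk' => hk k (List.mem_cons_of_mem _ hk')), List.foldl_cons]

-- the master descending pass: dict entries become pvF, the accumulator collects g * pvF g
lemma pvDescent (c : Int → Int) (MOD m : Int) (t a : Int) (ht : 0 ≤ t) (hta : t ≤ a) (ham : a ≤ m)
    (F : Array Int) (r : Int) (hsz : F.size = (m + 1).toNat)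
    (hF : ∀ k, a < k → k ≤ m → F.getD k.toNat 0 = pvF c MOD m k) :
    ((PySem.List.pyRange a t (-1)).foldl (fun (st : Array Int × Int) g =>
        (st.1.setIfInBounds g.toNat ((PySem.List.pyRange (2 * g) (m + 1) g).foldl
            (fun f k => PySem.Int.mod (f - st.1.getD k.toNat 0) MOD) (c g)),
         PySem.Int.mod (st.2 + g * ((PySem.List.pyRange (2 * g) (m + 1) g).foldl
            (fun f k => PySem.Int.mod (f - st.1.getD k.toNat 0) MOD) (c g))) MOD)) (F, r))
      = ((PySem.List.pyRange a t (-1)).foldl (fun F g =>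
            F.setIfInBounds g.toNat (pvF c MOD m g)) F,
         (PySem.List.pyRange a t (-1)).foldl (fun r g =>
            PySem.Int.mod (r + g * pvF c MOD m g) MOD) r)
      ∧ ∀ k, t < k → k ≤ m →
          ((PySem.List.pyRange a t (-1)).foldl (fun F g =>
            F.setIfInBounds g.toNat (pvF c MOD m g)) F).getD k.toNat 0
            = pvF c MOD m k := by
  rcases eq_or_lt_of_le hta with heq | hlt
  · subst heq
    rw [PySem.List.pyRange_neg_one_eq_nil (le_refl t)]
    exact ⟨rfl, fun k hk1 hk2 => hF k hk1 hk2⟩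
  · rw [PySem.List.pyRange_neg_one_cons hlt]
    simp only [List.foldl_cons]
    have hfg : (PySem.List.pyRange (2 * a) (m + 1) a).foldl
        (fun f k => PySem.Int.mod (f - F.getD k.toNat 0) MOD) (c a) = pvF c MOD m a := by
      rw [pvF_eq c MOD m a (by omega)]
      refine PySem.List.foldl_congr_mem _ _ _ _ ?_
      intro acc k hk
      have hb := (PySem.List.mem_pyRange_iff_of_pos (by omega : (0:Int) < a) k).1 hk
      rw [hF k (by omega) (by omega)]
    rw [hfg]
    have hF' : ∀ k, a - 1 < k → k ≤ m →
        (F.setIfInBounds a.toNat (pvF c MOD m a)).getD k.toNat 0 = pvF c MOD m k := by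
      intro k hk1 hk2
      by_cases hka : k = a
      · subst hka
        exact pvAGetD_set_self F k.toNat _ (by omega)
      · rw [pvAGetD_set_ne F a.toNat k.toNat _ (by omega)]
        exact hF k (by omega) hk2
    exact pvDescent c MOD m t (a - 1) ht (by omega) (by omega) _ _
      (by rw [Array.size_setIfInBounds]; exact hsz) hF'
  termination_by (a - t).toNat
  decreasing_by omega

-- fold congruence carrying an invariant of the accumulator (needed for the array bound)
lemma pvFoldl_congr_inv {α β : Type} (l : List α) (P : β → Prop) (f g : β → α → β) (init : β)
    (hinit : P init) (hcong : ∀ b x, P b → x ∈ l → f b x = g b x)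
    (hpres : ∀ b x, P b → x ∈ l → P (f b x)) :
    l.foldl f init = l.foldl g init := by
  induction l generalizing init with
  | nil => rfl
  | cons x l' ih =>
    rw [List.foldl_cons, List.foldl_cons,
        ← hcong init x hinit (List.mem_cons_self ..)]
    exact ih (f init x) (hpres init x hinit (List.mem_cons_self ..))
      (fun b y hb hy => hcong b y hb (List.mem_cons_of_mem _ hy))
      (fun b y hb hy => hpres b y hb (List.mem_cons_of_mem _ hy))

-- ===== VERDICT (by name: the statement is the Claim_ definition above) =====
theorem totalBeauty_spec : Claim_equal_totalBeauty := by
  unfold Claim_equal_totalBeauty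
  intro nums _ _
  unfold Spec_totalBeauty totalBeauty totalBeauty_alt
  rcases hmax : PySem.List.max? nums (fun x => x) with _ | m
  · rfl
  · dsimp only
    rcases (by omega : m ≤ 0 ∨ 0 < m) with hm | hm
    · rw [PySem.List.pyRange_one_eq_nil (by omega), PySem.List.pyRange_neg_one_eq_nil (by omega)]
      rfl
    · have hM : (0:Int) < 1000000007 := by norm_num
      -- B's bucket lookup per g is A's filtered list
      have hBstep :
          List.foldl (fun (st : Array Int × Int) g =>
            (st.1.setIfInBounds g.toNat
                (List.foldl (fun f k => PySem.Int.mod (f - st.1.getD k.toNat 0) 1000000007)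
                  (pvCountInc 1000000007
                    ((List.foldl (fun bk num =>
                        List.foldl (fun bk g => bk.modify g [] fun l => l ++ [PySem.Int.floordiv num g]) bk
                          (if (if num < 0 then -num else num) = 0 then PySem.List.pyRange 1 (m + 1)
                          else pvDivs (if num < 0 then -num else num) 1 []))
                      PySem.Dict.empty nums).getD g []))
                  (PySem.List.pyRange (2 * g) (m + 1) g)),
              PySem.Int.mod
                (st.2 + g * (List.foldl (fun f k => PySem.Int.mod (f - st.1.getD k.toNat 0) 1000000007)
                  (pvCountInc 1000000007
                    ((List.foldl (fun bk num =>
                        List.foldl (fun bk g => bk.modify g [] fun l => l ++ [PySem.Int.floordiv num g]) bk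
                          (if (if num < 0 then -num else num) = 0 then PySem.List.pyRange 1 (m + 1)
                          else pvDivs (if num < 0 then -num else num) 1 []))
                      PySem.Dict.empty nums).getD g []))
                  (PySem.List.pyRange (2 * g) (m + 1) g))) 1000000007))
            (Array.replicate (m + 1).toNat 0, 0) (PySem.List.pyRange m 0 (-1))
          = List.foldl (fun (st : Array Int × Int) g =>
            (st.1.setIfInBounds g.toNat
                (List.foldl (fun f k => PySem.Int.mod (f - st.1.getD k.toNat 0) 1000000007)
                  (pvCountInc 1000000007 (List.foldl (fun acc num =>
                    if PySem.Int.mod num g = 0 then acc ++ [PySem.Int.floordiv num g] else acc) [] nums))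
                  (PySem.List.pyRange (2 * g) (m + 1) g)),
              PySem.Int.mod
                (st.2 + g * (List.foldl (fun f k => PySem.Int.mod (f - st.1.getD k.toNat 0) 1000000007)
                  (pvCountInc 1000000007 (List.foldl (fun acc num =>
                    if PySem.Int.mod num g = 0 then acc ++ [PySem.Int.floordiv num g] else acc) [] nums))
                  (PySem.List.pyRange (2 * g) (m + 1) g))) 1000000007))
            (Array.replicate (m + 1).toNat 0, 0) (PySem.List.pyRange m 0 (-1)) := by
        refine PySem.List.foldl_congr_mem _ _ _ _ ?_
        intro st g hgmem
        have hb := PySem.List.mem_pyRange_neg_one.1 hgmem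
        have hbk : ((List.foldl (fun bk num =>
            List.foldl (fun bk g => bk.modify g [] fun l => l ++ [PySem.Int.floordiv num g]) bk
              (if (if num < 0 then -num else num) = 0 then PySem.List.pyRange 1 (m + 1)
              else pvDivs (if num < 0 then -num else num) 1 []))
            PySem.Dict.empty nums).getD g [])
            = List.foldl (fun acc num =>
                if PySem.Int.mod num g = 0 then acc ++ [PySem.Int.floordiv num g] else acc) [] nums := by
          rw [pvBucket_eq_filtered nums m g (by omega) (by omega) PySem.Dict.empty,
              PySem.List.foldl_append_ite (fun num => PySem.Int.mod num g = 0)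
                (fun num => PySem.Int.floordiv num g) nums []]
          simp [PySem.Dict.getD_empty]
        rw [hbk]
      rw [hBstep]
      have hdesc := pvDescent (fun g => pvCountInc 1000000007 (List.foldl (fun acc num =>
          if PySem.Int.mod num g = 0 then acc ++ [PySem.Int.floordiv num g] else acc) [] nums))
        1000000007 m 0 m le_rfl (by omega) le_rfl (Array.replicate (m + 1).toNat 0) 0
        (Array.size_replicate) (by intro k hk1 hk2; omega)
      simp only [] at hdesc
      have hstep_eq : ∀ (F : Array Int) (g : Int), F.size = (m + 1).toNat →
          g ∈ PySem.List.pyRange m 0 (-1) →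
          (List.foldl (fun F k => F.setIfInBounds g.toNat
              (PySem.Int.mod (F.getD g.toNat 0 - F.getD k.toNat 0) 1000000007))
            (F.setIfInBounds g.toNat
              (((PySem.List.pyRange 1 (m + 1) 1).foldl (fun cnt g => cnt.setIfInBounds g.toNat
                  (pvCountInc 1000000007 (List.foldl (fun acc num =>
                    if PySem.Int.mod num g = 0 then acc ++ [PySem.Int.floordiv num g] else acc) [] nums)))
                (Array.replicate (m + 1).toNat 0)).getD g.toNat 0))
            (PySem.List.pyRange (2 * g) (m + 1) g))
          = F.setIfInBounds g.toNat
              (List.foldl (fun f k => PySem.Int.mod (f - F.getD k.toNat 0) 1000000007)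
                (pvCountInc 1000000007 (List.foldl (fun acc num =>
                  if PySem.Int.mod num g = 0 then acc ++ [PySem.Int.floordiv num g] else acc) [] nums))
                (PySem.List.pyRange (2 * g) (m + 1) g)) := by
        intro F g hP hgmem
        have hb := PySem.List.mem_pyRange_neg_one.1 hgmem
        rw [pvCnt_getD nums m 1000000007 g (by omega) (by omega)]
        refine pvInner_collapse 1000000007 _ g _ F (by omega) ?_
        intro k hk
        have hkb := (PySem.List.mem_pyRange_iff_of_pos (by omega : (0:Int) < g) k).1 hk
        omega
      have hAdict :
          List.foldl (fun F g =>
              List.foldl (fun F k => F.setIfInBounds g.toNat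
                  (PySem.Int.mod (F.getD g.toNat 0 - F.getD k.toNat 0) 1000000007))
                (F.setIfInBounds g.toNat
                  (((PySem.List.pyRange 1 (m + 1) 1).foldl (fun cnt g => cnt.setIfInBounds g.toNat
                      (pvCountInc 1000000007 (List.foldl (fun acc num =>
                        if PySem.Int.mod num g = 0 then acc ++ [PySem.Int.floordiv num g] else acc) [] nums)))
                    (Array.replicate (m + 1).toNat 0)).getD g.toNat 0))
                (PySem.List.pyRange (2 * g) (m + 1) g))
            (Array.replicate (m + 1).toNat 0) (PySem.List.pyRange m 0 (-1))
          = List.foldl (fun F g => F.setIfInBounds g.toNat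
              (List.foldl (fun f k => PySem.Int.mod (f - F.getD k.toNat 0) 1000000007)
                (pvCountInc 1000000007 (List.foldl (fun acc num =>
                  if PySem.Int.mod num g = 0 then acc ++ [PySem.Int.floordiv num g] else acc) [] nums))
                (PySem.List.pyRange (2 * g) (m + 1) g)))
            (Array.replicate (m + 1).toNat 0) (PySem.List.pyRange m 0 (-1)) := by
        refine pvFoldl_congr_inv _ (fun F => F.size = (m + 1).toNat) _ _ _
          Array.size_replicate (fun F g hP hgm => hstep_eq F g hP hgm) ?_
        intro F g hP hgmem
        rw [hstep_eq F g hP hgmem, Array.size_setIfInBounds]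
        exact hP
      have hfst := pvFst_foldl_pair (PySem.List.pyRange m 0 (-1))
        (fun F g => F.setIfInBounds g.toNat
          (List.foldl (fun f k => PySem.Int.mod (f - F.getD k.toNat 0) 1000000007)
            (pvCountInc 1000000007 (List.foldl (fun acc num =>
              if PySem.Int.mod num g = 0 then acc ++ [PySem.Int.floordiv num g] else acc) [] nums))
            (PySem.List.pyRange (2 * g) (m + 1) g)))
        (fun (st : Array Int × Int) g => PySem.Int.mod
          (st.2 + g * List.foldl (fun f k => PySem.Int.mod (f - st.1.getD k.toNat 0) 1000000007)
            (pvCountInc 1000000007 (List.foldl (fun acc num =>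
              if PySem.Int.mod num g = 0 then acc ++ [PySem.Int.floordiv num g] else acc) [] nums))
            (PySem.List.pyRange (2 * g) (m + 1) g)) 1000000007)
        (Array.replicate (m + 1).toNat 0, 0)
      simp only [] at hfst
      have hFA : ∀ g', 1 ≤ g' → g' ≤ m →
          (List.foldl (fun F g =>
              List.foldl (fun F k => F.setIfInBounds g.toNat
                  (PySem.Int.mod (F.getD g.toNat 0 - F.getD k.toNat 0) 1000000007))
                (F.setIfInBounds g.toNat
                  (((PySem.List.pyRange 1 (m + 1) 1).foldl (fun cnt g => cnt.setIfInBounds g.toNat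
                      (pvCountInc 1000000007 (List.foldl (fun acc num =>
                        if PySem.Int.mod num g = 0 then acc ++ [PySem.Int.floordiv num g] else acc) [] nums)))
                    (Array.replicate (m + 1).toNat 0)).getD g.toNat 0))
                (PySem.List.pyRange (2 * g) (m + 1) g))
            (Array.replicate (m + 1).toNat 0) (PySem.List.pyRange m 0 (-1))).getD g'.toNat 0
          = pvF (fun g => pvCountInc 1000000007 (List.foldl (fun acc num =>
          if PySem.Int.mod num g = 0 then acc ++ [PySem.Int.floordiv num g] else acc) [] nums)) 1000000007 m g' := by
        intro g' h1 h2
        rw [hAdict, ← hfst, hdesc.1]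
        exact hdesc.2 g' (by omega) h2
      refine (PySem.List.foldl_congr_mem _ _
        (fun result g => PySem.Int.mod (result + g * pvF (fun g => pvCountInc 1000000007 (List.foldl (fun acc num =>
          if PySem.Int.mod num g = 0 then acc ++ [PySem.Int.floordiv num g] else acc) [] nums)) 1000000007 m g) 1000000007) 0 ?_).trans ?_
      · intro acc g hgmem
        have hb := PySem.List.mem_pyRange_one.1 hgmem
        rw [hFA g (by omega) (by omega)]
      · rw [hdesc.1]
        have hmod1 := pvFoldl_modadd 1000000007 hM
          (fun g => g * pvF (fun g => pvCountInc 1000000007 (List.foldl (fun acc num =>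
          if PySem.Int.mod num g = 0 then acc ++ [PySem.Int.floordiv num g] else acc) [] nums)) 1000000007 m g)
          (PySem.List.pyRange 1 (m + 1) 1) 0 le_rfl hM
        have hmod2 := pvFoldl_modadd 1000000007 hM
          (fun g => g * pvF (fun g => pvCountInc 1000000007 (List.foldl (fun acc num =>
          if PySem.Int.mod num g = 0 then acc ++ [PySem.Int.floordiv num g] else acc) [] nums)) 1000000007 m g)
          (PySem.List.pyRange m 0 (-1)) 0 le_rfl hM
        simp only [] at hmod1 hmod2
        rw [hmod1]
        show _ = List.foldl _ 0 (PySem.List.pyRange m 0 (-1))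
        rw [hmod2, PySem.List.pyRange_neg_one_eq_reverse, List.map_reverse, List.sum_reverse]
        norm_num
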